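-- pv_equiv track=rewrite | github.com/Alvaropz/Python_problems_BinarySearch | 1. Easy/append_list_to_sum_target/append_list_to_sum_target.py | append_list_to_sum_target
-- ===== SOURCE A (Python) =====
-- def append_list_to_sum_target(nums, k, target):
--     total_sum = sum(nums)
--     count = 0
--     if target > total_sum:
--         while total_sum != target:
--             if total_sum + k <= target:
--                 nums.append(k)
--                 count +=1
--             if total_sum + k > target:
--                 k -= 1
--             total_sum = sum(nums)
--     elif target < total_sum:
--         k *= -1
--         while total_sum != target:
--             if total_sum + k >= target:
--                 nums.append(k)
--                 count +=1
--             if total_sum + k < target: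
--                 k += 1
--             total_sum = sum(nums)
--     return count
-- ===== SOURCE B (Python) =====
-- def append_list_to_sum_target(nums, k, target):
--     # Closed form: the loop greedily appends min(k, remaining gap) each time,
--     # so the number of appends is ceil(gap / min(k, gap)).
--     gap = abs(target - sum(nums))
--     if gap == 0:
--         return 0
--     step = min(k, gap)
--     return -(-gap // step)
-- ===== Notes on version B (the rewrite author's own statement) =====
-- stated objective: faster
-- what changed: Replaced the step-by-step append loop (which re-sums the list every iteration) by a closed-form ceiling division ceil(gap/min(k,gap)) computed from one initial sum; Pre_ excludes gap != 0 with k < 1, where A loops forever.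
import Mathlib
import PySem

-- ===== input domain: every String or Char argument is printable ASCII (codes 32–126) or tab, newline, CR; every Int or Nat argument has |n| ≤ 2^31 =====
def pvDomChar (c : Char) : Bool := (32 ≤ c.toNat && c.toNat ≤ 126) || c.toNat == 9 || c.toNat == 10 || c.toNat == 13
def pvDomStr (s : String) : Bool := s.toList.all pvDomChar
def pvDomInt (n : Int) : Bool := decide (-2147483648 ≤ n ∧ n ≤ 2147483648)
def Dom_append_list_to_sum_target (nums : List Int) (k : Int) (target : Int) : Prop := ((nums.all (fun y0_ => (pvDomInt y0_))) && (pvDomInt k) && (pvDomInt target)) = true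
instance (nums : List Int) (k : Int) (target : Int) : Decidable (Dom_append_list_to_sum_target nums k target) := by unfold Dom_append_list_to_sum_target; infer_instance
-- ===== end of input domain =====

-- B replaces A's one-append-at-a-time loop by a closed-form ceiling division (objective: faster).
-- A mutates `nums` in place (appends to it); the equivalence proved here is about the RETURN value only.

-- ===== PORT A =====
-- The while loops of A; the fuel argument only makes the recursion total and is
-- large enough to never be exhausted on inputs satisfying Pre_ (where A terminates).
def pvLoopUp : Nat → List Int → Int → Int → Int → Int
  | 0, _, _, _, count => count
  | fuel+1, nums, k, target, count =>
    if nums.sum ≠ target then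
      let total := nums.sum
      let nums' := if total + k ≤ target then nums ++ [k] else nums
      let count' := if total + k ≤ target then count + 1 else count
      let k' := if total + k > target then k - 1 else k
      pvLoopUp fuel nums' k' target count'
    else count

def pvLoopDown : Nat → List Int → Int → Int → Int → Int
  | 0, _, _, _, count => count
  | fuel+1, nums, k, target, count =>
    if nums.sum ≠ target then
      let total := nums.sum
      let nums' := if total + k ≥ target then nums ++ [k] else nums
      let count' := if total + k ≥ target then count + 1 else count
      let k' := if total + k < target then k + 1 else k
      pvLoopDown fuel nums' k' target count'
    else count

def append_list_to_sum_target (nums : List Int) (k : Int) (target : Int) : Int :=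
  let total_sum := nums.sum
  if target > total_sum then
    pvLoopUp (k.natAbs + (target - total_sum).natAbs + 1) nums k target 0
  else if target < total_sum then
    pvLoopDown (k.natAbs + (target - total_sum).natAbs + 1) nums (-k) target 0
  else 0

-- ===== PORT B =====
def append_list_to_sum_target_alt (nums : List Int) (k : Int) (target : Int) : Int :=
  let gap := |target - nums.sum|
  if gap = 0 then 0
  else
    let step := min k gap;
    -(PySem.Int.floordiv (-gap) step)

-- ===== PRECONDITION & SPEC =====
-- Pre_ excludes exactly the inputs on which A never returns: when the gap is nonzero
-- and k < 1, A's loop appends a nonpositive (resp. nonnegative) step forever.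
def Pre_append_list_to_sum_target (nums : List Int) (k : Int) (target : Int) : Prop :=
  target = nums.sum ∨ 1 ≤ k
instance (nums : List Int) (k : Int) (target : Int) : Decidable (Pre_append_list_to_sum_target nums k target) := by unfold Pre_append_list_to_sum_target; infer_instance

def pvWitness_append_list_to_sum_target : List Int × Int × Int := ([1, 2], 3, 10)

def Spec_append_list_to_sum_target (nums : List Int) (k : Int) (target : Int) (out : Int) : Prop := out = append_list_to_sum_target_alt nums k target
instance (nums : List Int) (k : Int) (target : Int) (out : Int) : Decidable (Spec_append_list_to_sum_target nums k target out) := by unfold Spec_append_list_to_sum_target; infer_instance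

-- ===== CLAIM (what is proved, stated in full; the proofs are below) =====
def Claim_equal_append_list_to_sum_target : Prop := ∀ (nums : List Int) (k : Int) (target : Int), Dom_append_list_to_sum_target nums k target → Pre_append_list_to_sum_target nums k target → Spec_append_list_to_sum_target nums k target (append_list_to_sum_target nums k target)

-- ===== LEMMAS AND PROOFS =====

-- ceiling division as computed by B
def pvCeil (g s : Int) : Int := -(PySem.Int.floordiv (-g) s)

theorem pvCeil_eq (g s q : Int) (hs : 0 < s) (h1 : (q - 1) * s < g) (h2 : g ≤ q * s) :
    pvCeil g s = q :=
  (PySem.Int.neg_floordiv_neg_eq_iff_of_pos hs).mpr ⟨h1, h2⟩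

theorem pvCeil_bounds (g s : Int) (hs : 0 < s) :
    (pvCeil g s - 1) * s < g ∧ g ≤ pvCeil g s * s :=
  (PySem.Int.neg_floordiv_neg_eq_iff_of_pos hs).mp rfl

theorem pvCeil_step (g k : Int) (hk : 1 ≤ k) (hkg : k < g) :
    pvCeil g k = 1 + pvCeil (g - k) (min k (g - k)) := by
  by_cases h : g - k < k
  · rw [(by omega : min k (g - k) = g - k),
        pvCeil_eq (g - k) (g - k) 1 (by omega) (by ring_nf; omega) (by omega),
        pvCeil_eq g k 2 (by omega) (by ring_nf; omega) (by nlinarith)]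
    norm_num
  · rw [(by omega : min k (g - k) = k)]
    obtain ⟨b1, b2⟩ := pvCeil_bounds (g - k) k (by omega)
    rw [pvCeil_eq g k (pvCeil (g - k) k + 1) (by omega) (by nlinarith) (by nlinarith)]
    ring

theorem pvLoopUp_done (fuel : Nat) (nums : List Int) (k target count : Int)
    (h : nums.sum = target) : pvLoopUp fuel nums k target count = count := by
  cases fuel <;> simp [pvLoopUp, h]

theorem pvLoopUp_eq (fuel : Nat) : ∀ (nums : List Int) (k target count : Int),
    0 < target - nums.sum → 1 ≤ k →
    k.natAbs + (target - nums.sum).natAbs ≤ fuel →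
    pvLoopUp fuel nums k target count
      = count + pvCeil (target - nums.sum) (min k (target - nums.sum)) := by
  induction fuel with
  | zero => intro nums k target count hg hk hf; omega
  | succ fuel ih =>
    intro nums k target count hg hk hf
    set g := target - nums.sum with hgdef
    have hne : nums.sum ≠ target := by omega
    by_cases h : nums.sum + k ≤ target
    · -- append branch
      have hnk : ¬ (nums.sum + k > target) := by omega
      have hkg : k ≤ g := by omega
      simp only [pvLoopUp, hne, ne_eq, not_false_iff, if_true, if_pos h, if_neg hnk]
      have hsum : (nums ++ [k]).sum = nums.sum + k := by simp
      by_cases heq : nums.sum + k = target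
      · -- reached the target
        rw [pvLoopUp_done fuel _ _ _ _ (by omega : (nums ++ [k]).sum = target)]
        have hmin : min k g = g := by omega
        rw [hmin, pvCeil_eq g g 1 (by omega) (by ring_nf; omega) (by omega)]
      · -- k < g : one more append, gap shrinks by k
        have hklt : k < g := by omega
        have hg' : 0 < target - (nums ++ [k]).sum := by rw [hsum]; omega
        have hgap' : target - (nums ++ [k]).sum = g - k := by rw [hsum]; omega
        rw [ih (nums ++ [k]) k target (count + 1) hg' hk (by rw [hgap']; omega)]
        rw [hgap', (by omega : min k g = k), pvCeil_step g k hk hklt]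
        ring
    · -- decrement branch
      have hk2 : g < k := by omega
      have hnk : nums.sum + k > target := by omega
      simp only [pvLoopUp, hne, ne_eq, not_false_iff, if_true, if_neg h, if_pos hnk]
      rw [ih nums (k - 1) target count (by omega) (by omega) (by omega)]
      have h1 : min (k - 1) g = g := by omega
      have h2 : min k g = g := by omega
      rw [h1, h2]

theorem pvSum_map_neg (nums : List Int) : (nums.map (Neg.neg : Int → Int)).sum = -nums.sum := by
  induction nums with
  | nil => simp
  | cons a l ihl => simp [ihl]; ring

-- pvLoopDown is pvLoopUp on the negated problem
theorem pvLoopDown_eq_up (fuel : Nat) : ∀ (nums : List Int) (k target count : Int),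
    pvLoopDown fuel nums k target count
      = pvLoopUp fuel (nums.map Neg.neg) (-k) (-target) count := by
  induction fuel with
  | zero => intro nums k target count; rfl
  | succ fuel ih =>
    intro nums k target count
    have hsum : (nums.map Neg.neg).sum = -nums.sum := by
      induction nums with
      | nil => simp
      | cons a l ihl => simp [ihl]; ring
    simp only [pvLoopDown, pvLoopUp, hsum]
    by_cases h0 : nums.sum = target
    · rw [if_neg (show ¬ nums.sum ≠ target by omega),
          if_neg (show ¬ -nums.sum ≠ -target by omega)]
    · rw [if_pos (show nums.sum ≠ target from h0),
          if_pos (show -nums.sum ≠ -target by omega), ih]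
      by_cases h1 : nums.sum + k ≥ target
      · rw [if_pos h1, if_pos h1, if_neg (show ¬ nums.sum + k < target by omega),
            if_pos (show -nums.sum + -k ≤ -target by omega),
            if_pos (show -nums.sum + -k ≤ -target by omega),
            if_neg (show ¬ -nums.sum + -k > -target by omega)]
        simp
      · rw [if_neg h1, if_neg h1, if_pos (show nums.sum + k < target by omega),
            if_neg (show ¬ -nums.sum + -k ≤ -target by omega),
            if_neg (show ¬ -nums.sum + -k ≤ -target by omega),
            if_pos (show -nums.sum + -k > -target by omega)]
        ring_nf

-- ===== VERDICT (by name: the statement is the Claim_ definition above) =====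
theorem append_list_to_sum_target_spec : Claim_equal_append_list_to_sum_target := by
  intro nums k target _ hpre
  unfold Spec_append_list_to_sum_target append_list_to_sum_target append_list_to_sum_target_alt
  simp only []
  rcases lt_trichotomy target nums.sum with hlt | heq | hgt
  · -- target < sum : down loop
    have hk : 1 ≤ k := by rcases hpre with h | h <;> omega
    rw [if_neg (by omega : ¬ target > nums.sum), if_pos hlt, pvLoopDown_eq_up]
    have hsum := pvSum_map_neg nums
    rw [pvLoopUp_eq _ _ _ _ _ (by rw [hsum]; omega) (by omega) (by rw [hsum]; omega)]
    have habs : |target - nums.sum| = nums.sum - target := by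
      rw [abs_of_neg (by omega)]; ring
    rw [if_neg (by rw [habs]; omega : ¬ |target - nums.sum| = 0)]
    rw [hsum, habs, neg_neg]
    have : -target - -nums.sum = nums.sum - target := by ring
    rw [this, zero_add]
    rfl
  · -- target = sum
    rw [if_neg (by omega : ¬ target > nums.sum), if_neg (by omega : ¬ target < nums.sum),
        if_pos (by rw [heq]; simp : |target - nums.sum| = 0)]
  · -- target > sum : up loop
    have hk : 1 ≤ k := by rcases hpre with h | h <;> omega
    rw [if_pos hgt, pvLoopUp_eq _ _ _ _ _ (by omega) hk (by omega)]
    have habs : |target - nums.sum| = target - nums.sum := abs_of_pos (by omega)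
    rw [if_neg (by rw [habs]; omega : ¬ |target - nums.sum| = 0), habs, zero_add]
    rfl
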